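-- pv_equiv track=rewrite | github.com/tareksanger/COMP3007 | recursion/recusion_with_strings.py | index_of_left_most_underscore
-- ===== SOURCE A (Python) =====
-- def index_of_left_most_underscore(word):
--     if not word:
--         return 0
--     if word[0] != '_':
--         return 1 + index_of_left_most_underscore(word[1:])
--     else:
--         word = word[0]
--         return index_of_left_most_underscore(word[1:])
-- ===== SOURCE B (Python) =====
-- def index_of_left_most_underscore(word):
--     for i, ch in enumerate(word):
--         if ch == '_':
--             return i
--     return len(word)
-- ===== Notes on version B (the rewrite author's own statement) =====
-- stated objective: faster
-- what changed: Replaced the linear recursion over suffixes (which copies a slice at every step) by a single iterative enumerate scan that returns the first underscore's index, falling back to len(word).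
import Mathlib
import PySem

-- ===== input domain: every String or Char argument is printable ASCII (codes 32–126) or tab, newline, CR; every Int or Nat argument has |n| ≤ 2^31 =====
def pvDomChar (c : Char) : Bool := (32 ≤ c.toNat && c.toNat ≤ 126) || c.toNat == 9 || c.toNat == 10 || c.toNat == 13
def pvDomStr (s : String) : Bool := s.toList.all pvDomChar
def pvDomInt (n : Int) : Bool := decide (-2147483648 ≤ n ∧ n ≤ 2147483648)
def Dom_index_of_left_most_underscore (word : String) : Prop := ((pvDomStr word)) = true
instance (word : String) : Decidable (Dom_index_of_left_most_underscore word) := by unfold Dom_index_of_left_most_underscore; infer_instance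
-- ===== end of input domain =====

-- B replaces A's recursion over suffixes with a single iterative enumerate scan (objective: simpler).
-- ===== PORT A =====
-- literal transliteration of A: recursion on the character list; the else branch
-- rebinds word to its first character and recurses on that string's tail ([c].drop 1).
def pvA_rec : List Char → Int
  | [] => 0
  | c :: rest =>
    if c ≠ '_' then 1 + pvA_rec rest
    else pvA_rec (List.drop 1 [c])
termination_by l => l.length
decreasing_by all_goals simp

def index_of_left_most_underscore (word : String) : Int := pvA_rec word.toList

-- ===== PORT B =====
-- the for-loop body over enumerate(word), with the post-loop return len(word)
def pvB_loop : List (Int × Char) → Int → Int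
  | [], n => n
  | (i, ch) :: rest, n => if ch = '_' then i else pvB_loop rest n

def index_of_left_most_underscore_alt (word : String) : Int :=
  pvB_loop (PySem.List.enumerate word.toList 0) (word.toList.length : Int)

-- ===== PRECONDITION & SPEC =====
def Spec_index_of_left_most_underscore (word : String) (out : Int) : Prop := out = index_of_left_most_underscore_alt word
instance (word : String) (out : Int) : Decidable (Spec_index_of_left_most_underscore word out) := by unfold Spec_index_of_left_most_underscore; infer_instance

-- ===== CLAIM (what is proved, stated in full; the proofs are below) =====
def Claim_equal_index_of_left_most_underscore : Prop := ∀ (word : String), Dom_index_of_left_most_underscore word → Spec_index_of_left_most_underscore word (index_of_left_most_underscore word)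

-- ===== LEMMAS AND PROOFS =====
theorem pvB_loop_enum (l : List Char) (s : Int) :
    pvB_loop (PySem.List.enumerate l s) (s + (l.length : Int)) = s + pvA_rec l := by
  induction l generalizing s with
  | nil => simp [PySem.List.enumerate_nil, pvB_loop, pvA_rec]
  | cons c rest ih =>
    simp only [PySem.List.enumerate_cons, pvB_loop, pvA_rec]
    by_cases h : c = '_'
    · simp [h, pvA_rec]
    · simp only [h, if_false, ite_not, List.length_cons]
      have := ih (s + 1)
      have h2 : s + (((rest.length : Int)) + 1) = (s + 1) + rest.length := by ring
      push_cast
      push_cast at this h2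
      rw [h2, this]; ring

-- ===== VERDICT (by name: the statement is the Claim_ definition above) =====
theorem index_of_left_most_underscore_spec : Claim_equal_index_of_left_most_underscore := by
  intro word _
  unfold Spec_index_of_left_most_underscore index_of_left_most_underscore index_of_left_most_underscore_alt
  have := pvB_loop_enum word.toList 0
  simpa using this.symm
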